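-- pv_equiv track=rewrite | github.com/dangerisom/Isom-Lab | github_website/projects/pHinder/code/pdbFile_cif.py | assess_cif_fields
-- ===== SOURCE A (Python) =====
-- def assess_cif_fields(cif_options):
--
-- 	cif_options_all = {
-- 						"_atom_site.group_PDB": False,
-- 						"_atom_site.id":False,
-- 						"_atom_site.type_symbol":False,
-- 						"_atom_site.label_atom_id":False,
-- 						"_atom_site.label_alt_id":False,
-- 						"_atom_site.label_comp_id":False,
-- 						"_atom_site.label_asym_id":False,
-- 						"_atom_site.label_entity_id":False,
-- 						"_atom_site.label_seq_id":False,
-- 						"_atom_site.pdbx_PDB_ins_code":False,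
-- 						"_atom_site.Cartn_x":False,
-- 						"_atom_site.Cartn_y":False,
-- 						"_atom_site.Cartn_z":False,
-- 						"_atom_site.occupancy":False,
-- 						"_atom_site.B_iso_or_equiv":False,
-- 						"_atom_site.Cartn_x_esd":False,
-- 						"_atom_site.Cartn_y_esd":False,
-- 						"_atom_site.Cartn_z_esd":False,
-- 						"_atom_site.occupancy_esd":False,
-- 						"_atom_site.B_iso_or_equiv_esd":False,
-- 						"_atom_site.pdbx_formal_charge":False,
-- 						"_atom_site.auth_seq_id":False,
-- 						"_atom_site.auth_comp_id":False,
-- 						"_atom_site.auth_asym_id":False,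
-- 						"_atom_site.auth_atom_id":False,
-- 						"_atom_site.pdbx_PDB_model_num":False}
--
-- 	for cif_option in cif_options.split("\n"):
-- 		if cif_option in cif_options_all:
-- 			cif_options_all[cif_option] = True
--
-- 	return cif_options_all
-- ===== SOURCE B (Python) =====
-- FIELD_NAMES = [
--     "_atom_site.group_PDB",
--     "_atom_site.id",
--     "_atom_site.type_symbol",
--     "_atom_site.label_atom_id",
--     "_atom_site.label_alt_id",
--     "_atom_site.label_comp_id",
--     "_atom_site.label_asym_id",
--     "_atom_site.label_entity_id",
--     "_atom_site.label_seq_id",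
--     "_atom_site.pdbx_PDB_ins_code",
--     "_atom_site.Cartn_x",
--     "_atom_site.Cartn_y",
--     "_atom_site.Cartn_z",
--     "_atom_site.occupancy",
--     "_atom_site.B_iso_or_equiv",
--     "_atom_site.Cartn_x_esd",
--     "_atom_site.Cartn_y_esd",
--     "_atom_site.Cartn_z_esd",
--     "_atom_site.occupancy_esd",
--     "_atom_site.B_iso_or_equiv_esd",
--     "_atom_site.pdbx_formal_charge",
--     "_atom_site.auth_seq_id",
--     "_atom_site.auth_comp_id",
--     "_atom_site.auth_asym_id",
--     "_atom_site.auth_atom_id",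
--     "_atom_site.pdbx_PDB_model_num",
-- ]
--
--
-- def assess_cif_fields(cif_options):
--     # Loop over the fixed field names, testing each against the set of input
--     # lines, instead of looping over the input lines and flipping dict entries.
--     present = set(cif_options.split("\n"))
--     return {name: name in present for name in FIELD_NAMES}
-- ===== Notes on version B (the rewrite author's own statement) =====
-- stated objective: simpler
-- what changed: The driving loop now ranges over the fixed list of 26 field names (a dict comprehension testing each name against a set built once from the input lines) instead of iterating over the input lines and flipping entries of a pre-built all-False dict.
import Mathlib
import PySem

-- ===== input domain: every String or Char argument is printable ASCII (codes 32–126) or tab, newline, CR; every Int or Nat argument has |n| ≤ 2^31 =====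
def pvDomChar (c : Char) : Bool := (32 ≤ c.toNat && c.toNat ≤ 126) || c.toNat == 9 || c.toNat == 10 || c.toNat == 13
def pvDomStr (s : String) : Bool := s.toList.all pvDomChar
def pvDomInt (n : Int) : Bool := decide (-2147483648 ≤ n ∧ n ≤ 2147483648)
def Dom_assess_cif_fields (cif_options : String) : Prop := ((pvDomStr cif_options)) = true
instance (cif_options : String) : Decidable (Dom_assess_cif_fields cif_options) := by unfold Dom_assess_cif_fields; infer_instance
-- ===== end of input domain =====

-- B iterates over the fixed 26 field names against a set of input lines instead of looping over input lines flipping a pre-built all-False dict; return values proved equal for all inputs.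


-- ===== PORT A =====
-- A builds the dict of all 26 field names mapped to False, then loops over the
-- input lines, setting an entry to True when the line is a key of the dict.
def assess_cif_fields (cif_options : String) : List (String × Bool) :=
  let cif_options_all : PySem.Dict String Bool := PySem.Dict.ofList
    [("_atom_site.group_PDB", false),
     ("_atom_site.id", false),
     ("_atom_site.type_symbol", false),
     ("_atom_site.label_atom_id", false),
     ("_atom_site.label_alt_id", false),
     ("_atom_site.label_comp_id", false),
     ("_atom_site.label_asym_id", false),
     ("_atom_site.label_entity_id", false),
     ("_atom_site.label_seq_id", false),
     ("_atom_site.pdbx_PDB_ins_code", false),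
     ("_atom_site.Cartn_x", false),
     ("_atom_site.Cartn_y", false),
     ("_atom_site.Cartn_z", false),
     ("_atom_site.occupancy", false),
     ("_atom_site.B_iso_or_equiv", false),
     ("_atom_site.Cartn_x_esd", false),
     ("_atom_site.Cartn_y_esd", false),
     ("_atom_site.Cartn_z_esd", false),
     ("_atom_site.occupancy_esd", false),
     ("_atom_site.B_iso_or_equiv_esd", false),
     ("_atom_site.pdbx_formal_charge", false),
     ("_atom_site.auth_seq_id", false),
     ("_atom_site.auth_comp_id", false),
     ("_atom_site.auth_asym_id", false),
     ("_atom_site.auth_atom_id", false),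
     ("_atom_site.pdbx_PDB_model_num", false)]
  -- for cif_option in cif_options.split("\n"): if cif_option in d: d[cif_option] = True
  -- split("\n") with a nonempty literal separator never raises: .getD [] is unreachable
  let final := ((PySem.Str.split? cif_options "\n").getD []).foldl
    (fun d cif_option => if d.contains cif_option then d.insert cif_option true else d)
    cif_options_all
  final.items

-- ===== PORT B =====
-- module-level FIELD_NAMES of Source B
def pvFieldNames : List String :=
  ["_atom_site.group_PDB",
   "_atom_site.id",
   "_atom_site.type_symbol",
   "_atom_site.label_atom_id",
   "_atom_site.label_alt_id",
   "_atom_site.label_comp_id",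
   "_atom_site.label_asym_id",
   "_atom_site.label_entity_id",
   "_atom_site.label_seq_id",
   "_atom_site.pdbx_PDB_ins_code",
   "_atom_site.Cartn_x",
   "_atom_site.Cartn_y",
   "_atom_site.Cartn_z",
   "_atom_site.occupancy",
   "_atom_site.B_iso_or_equiv",
   "_atom_site.Cartn_x_esd",
   "_atom_site.Cartn_y_esd",
   "_atom_site.Cartn_z_esd",
   "_atom_site.occupancy_esd",
   "_atom_site.B_iso_or_equiv_esd",
   "_atom_site.pdbx_formal_charge",
   "_atom_site.auth_seq_id",
   "_atom_site.auth_comp_id",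
   "_atom_site.auth_asym_id",
   "_atom_site.auth_atom_id",
   "_atom_site.pdbx_PDB_model_num"]

def assess_cif_fields_alt (cif_options : String) : List (String × Bool) :=
  let present : PySem.Set String :=
    PySem.Set.ofList ((PySem.Str.split? cif_options "\n").getD [])
  pvFieldNames.map (fun name => (name, present.contains name))

-- ===== PRECONDITION & SPEC =====
def Spec_assess_cif_fields (cif_options : String) (out : List (String × Bool)) : Prop := out = assess_cif_fields_alt cif_options
instance (cif_options : String) (out : List (String × Bool)) : Decidable (Spec_assess_cif_fields cif_options out) := by unfold Spec_assess_cif_fields; infer_instance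

-- ===== CLAIM (what is proved, stated in full; the proofs are below) =====
def Claim_equal_assess_cif_fields : Prop := ∀ (cif_options : String), Dom_assess_cif_fields cif_options → Spec_assess_cif_fields cif_options (assess_cif_fields cif_options)

-- ===== LEMMAS AND PROOFS =====

-- A's loop over the lines, started from the all-`g` dict over the fixed keys,
-- ends with key k mapped to `g k || lines.contains k` — keys and order unchanged.
theorem pv_loop_items (lines : List String) (g : String → Bool) :
    (lines.foldl
      (fun d cif_option => if d.contains cif_option then d.insert cif_option true else d)
      (PySem.Dict.mk (pvFieldNames.map (fun k => (k, g k))))).items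
    = pvFieldNames.map (fun k => (k, g k || lines.contains k)) := by
  induction lines generalizing g with
  | nil => simp
  | cons l ls ih =>
    simp only [List.foldl_cons, List.contains_cons]
    by_cases hl : (PySem.Dict.mk (pvFieldNames.map (fun k => (k, g k)))).contains l = true
    · rw [if_pos hl]
      have hins : (PySem.Dict.mk (pvFieldNames.map (fun k => (k, g k)))).insert l true
          = PySem.Dict.mk (pvFieldNames.map (fun k => (k, if k == l then true else g k))) := by
        simp only [PySem.Dict.insert, if_pos hl, List.map_map]
        congr 1
        apply List.map_congr_left
        intro k _
        by_cases hk : k = l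
        · subst hk; simp
        · simp [hk, beq_iff_eq]
      rw [hins, ih]
      apply List.map_congr_left
      intro k _
      by_cases hk : k = l
      · subst hk; simp
      · have hke : (k == l) = false := by simp [hk]
        simp [hke]
    · rw [if_neg hl]
      rw [ih]
      have hlmem : l ∉ pvFieldNames := by
        intro hm
        apply hl
        simp only [PySem.Dict.contains, List.any_map, List.any_eq_true, Function.comp]
        exact ⟨l, hm, by simp⟩
      apply List.map_congr_left
      intro k hk
      have hkl : k ≠ l := fun h => hlmem (h ▸ hk)
      have hke : (k == l) = false := by simp [hkl]
      simp [hke]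

-- the literal dict of A is exactly the all-false map over pvFieldNames
theorem pv_init_items :
    (PySem.Dict.ofList
      [("_atom_site.group_PDB", false),
       ("_atom_site.id", false),
       ("_atom_site.type_symbol", false),
       ("_atom_site.label_atom_id", false),
       ("_atom_site.label_alt_id", false),
       ("_atom_site.label_comp_id", false),
       ("_atom_site.label_asym_id", false),
       ("_atom_site.label_entity_id", false),
       ("_atom_site.label_seq_id", false),
       ("_atom_site.pdbx_PDB_ins_code", false),
       ("_atom_site.Cartn_x", false),
       ("_atom_site.Cartn_y", false),
       ("_atom_site.Cartn_z", false),
       ("_atom_site.occupancy", false),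
       ("_atom_site.B_iso_or_equiv", false),
       ("_atom_site.Cartn_x_esd", false),
       ("_atom_site.Cartn_y_esd", false),
       ("_atom_site.Cartn_z_esd", false),
       ("_atom_site.occupancy_esd", false),
       ("_atom_site.B_iso_or_equiv_esd", false),
       ("_atom_site.pdbx_formal_charge", false),
       ("_atom_site.auth_seq_id", false),
       ("_atom_site.auth_comp_id", false),
       ("_atom_site.auth_asym_id", false),
       ("_atom_site.auth_atom_id", false),
       ("_atom_site.pdbx_PDB_model_num", false)] : PySem.Dict String Bool)
    = PySem.Dict.mk (pvFieldNames.map (fun k => (k, false))) := by decide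

-- ===== VERDICT (by name: the statement is the Claim_ definition above) =====
theorem assess_cif_fields_spec : Claim_equal_assess_cif_fields := by
  intro cif_options _
  unfold Spec_assess_cif_fields assess_cif_fields assess_cif_fields_alt
  rw [pv_init_items, pv_loop_items]
  apply List.map_congr_left
  intro k _
  simp only [Bool.false_or, PySem.Set.contains]
  congr 1
  simp [PySem.Set.mem_ofList]
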